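-- pv_equiv track=rewrite | github.com/OleksiiHladkov/goit-python-core-autochecks | autocheck_04/autocheck_04_09/test15-valid-pincodes.py | is_valid_pin_codes
-- ===== SOURCE A (Python) =====
-- def is_valid_pin_codes(pin_codes: list) -> bool:
--     if len(pin_codes) == 0:
--         return False
--
--     available_numbers = [str(x) for x in range(0, 10)]
--
--     is_dublicates = True
--     is_string = True
--     is_four_symbols = True
--     is_numbers = True
--
--     pin_id = 1
--     for pin in pin_codes:
--         # dublicates
--         if pin in pin_codes[pin_id:]:
--             is_dublicates = False
--             break
--         # string
--         if not isinstance(pin, str):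
--             is_string = False
--             break
--         # four symbols
--         if len(pin) != 4:
--             is_four_symbols = False
--             break
--         # numbers
--         if len(set(pin) - set(available_numbers)) != 0:
--             is_numbers = False
--             break
--
--         pin_id += 1
--
--     return is_dublicates and is_string and is_four_symbols and is_numbers
-- ===== SOURCE B (Python) =====
-- def is_valid_pin_codes(pin_codes: list) -> bool:
--     if not pin_codes:
--         return False
--     for pin in pin_codes:
--         if not (isinstance(pin, str) and len(pin) == 4 and all("0" <= c <= "9" for c in pin)):
--             return False
--     return len(set(pin_codes)) == len(pin_codes)
-- ===== Notes on version B (the rewrite author's own statement) =====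
-- stated objective: simpler
-- what changed: B replaces A's interleaved per-element scan of the remaining suffix (pin in pin_codes[pin_id:]) and four break flags with a flat validation pass followed by a single set-cardinality comparison len(set(pin_codes)) == len(pin_codes) for duplicate detection.
import Mathlib
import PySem

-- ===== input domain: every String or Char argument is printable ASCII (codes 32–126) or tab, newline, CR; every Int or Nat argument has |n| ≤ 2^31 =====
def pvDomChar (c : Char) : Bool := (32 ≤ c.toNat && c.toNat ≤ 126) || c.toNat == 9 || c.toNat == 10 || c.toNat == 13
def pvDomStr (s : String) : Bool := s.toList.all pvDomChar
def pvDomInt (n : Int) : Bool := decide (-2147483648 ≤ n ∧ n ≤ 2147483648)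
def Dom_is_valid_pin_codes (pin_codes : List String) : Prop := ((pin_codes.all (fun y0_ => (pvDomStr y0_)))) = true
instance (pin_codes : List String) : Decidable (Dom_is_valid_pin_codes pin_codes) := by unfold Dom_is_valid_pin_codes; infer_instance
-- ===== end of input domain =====

-- B replaces A's per-element scan of the remaining suffix (duplicate search interleaved
-- with validation) by one flat validation pass followed by a single set-cardinality
-- comparison; objective: simpler.

-- ===== PORT A =====
-- the 'for pin in pin_codes' loop; pin_id is the running index used for the slice;
-- each 'break' makes one of the four flags False, hence the final conjunction False,
-- so a break is transliterated as an immediate false.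
def isValidPinLoopA (full avail : List String) : List String → Int → Bool
  | [], _ => true
  | pin :: rest, pin_id =>
    -- dublicates: 'if pin in pin_codes[pin_id:]'
    if (PySem.List.slice full (some pin_id) none).contains pin then false
    -- 'if not isinstance(pin, str)': always False under the List String typing, no branch needed
    -- four symbols
    else if PySem.Str.len pin ≠ 4 then false
    -- numbers: 'if len(set(pin) - set(available_numbers)) != 0' (set(pin) iterates 1-char strings)
    else if PySem.Set.len (PySem.Set.diff
              (PySem.Set.ofList (pin.toList.map (fun c => String.ofList [c])))
              (PySem.Set.ofList avail)) ≠ 0 then false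
    else isValidPinLoopA full avail rest (pin_id + 1)

def is_valid_pin_codes (pin_codes : List String) : Bool :=
  if PySem.List.len pin_codes == 0 then false
  else
    -- available_numbers = [str(x) for x in range(0, 10)]
    isValidPinLoopA pin_codes ((PySem.List.pyRange 0 10 1).map PySem.Int.toStr) pin_codes 1

-- ===== PORT B =====
-- validity of one pin: 'isinstance(pin, str) and len(pin) == 4 and all("0" <= c <= "9" for c in pin)'
-- (isinstance is always True under the List String typing; "0" <= c <= "9" on 1-char
-- strings is the code-point comparison '0' ≤ c ≤ '9')
def pvPinOkB (pin : String) : Bool :=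
  PySem.Str.len pin == 4 && pin.toList.all (fun c => decide ('0' ≤ c) && decide (c ≤ '9'))

def is_valid_pin_codes_alt (pin_codes : List String) : Bool :=
  if pin_codes.isEmpty then false
  else if !(pin_codes.all pvPinOkB) then false   -- the early-return validation loop
  else PySem.Set.len (PySem.Set.ofList pin_codes) == PySem.List.len pin_codes

-- ===== PRECONDITION & SPEC =====
def Spec_is_valid_pin_codes (pin_codes : List String) (out : Bool) : Prop := out = is_valid_pin_codes_alt pin_codes
instance (pin_codes : List String) (out : Bool) : Decidable (Spec_is_valid_pin_codes pin_codes out) := by unfold Spec_is_valid_pin_codes; infer_instance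

-- ===== CLAIM (what is proved, stated in full; the proofs are below) =====
def Claim_equal_is_valid_pin_codes : Prop := ∀ (pin_codes : List String), Dom_is_valid_pin_codes pin_codes → Spec_is_valid_pin_codes pin_codes (is_valid_pin_codes pin_codes)

-- ===== LEMMAS AND PROOFS =====

theorem char_eq_of_toNat (c d : Char) (h : c.toNat = d.toNat) : c = d :=
  Char.ext (UInt32.toNat_inj.mp h)

-- membership of a 1-char string in A's available_numbers list is the code-point range check
theorem digit_mem (c : Char) :
    (String.ofList [c] ∈ (["0","1","2","3","4","5","6","7","8","9"] : List String)) ↔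
      (48 ≤ c.toNat ∧ c.toNat ≤ 57) := by
  simp only [List.mem_cons, List.not_mem_nil, or_false]
  constructor
  · rintro (h|h|h|h|h|h|h|h|h|h) <;>
      (have := congrArg String.toList h; simp at this; subst this; simp)
  · rintro ⟨h1, h2⟩
    have h48 : c.toNat = 48 ∨ c.toNat = 49 ∨ c.toNat = 50 ∨ c.toNat = 51 ∨ c.toNat = 52 ∨
        c.toNat = 53 ∨ c.toNat = 54 ∨ c.toNat = 55 ∨ c.toNat = 56 ∨ c.toNat = 57 := by omega
    rcases h48 with (h|h|h|h|h|h|h|h|h|h)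
    · rw [char_eq_of_toNat c '0' h]; simp
    · rw [char_eq_of_toNat c '1' h]; simp
    · rw [char_eq_of_toNat c '2' h]; simp
    · rw [char_eq_of_toNat c '3' h]; simp
    · rw [char_eq_of_toNat c '4' h]; simp
    · rw [char_eq_of_toNat c '5' h]; simp
    · rw [char_eq_of_toNat c '6' h]; simp
    · rw [char_eq_of_toNat c '7' h]; simp
    · rw [char_eq_of_toNat c '8' h]; simp
    · rw [char_eq_of_toNat c '9' h]; simp

theorem char_le_digit0 (c : Char) : (('0' : Char) ≤ c ↔ 48 ≤ c.toNat) := by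
  rw [Char.le_def, UInt32.le_iff_toNat_le]; rfl

theorem char_le_digit9 (c : Char) : (c ≤ ('9' : Char) ↔ c.toNat ≤ 57) := by
  rw [Char.le_def, UInt32.le_iff_toNat_le]; rfl

-- A's set-difference "all characters are digits" test equals B's per-character range test
theorem numbers_check_eq (pin : String) :
    (PySem.Set.len (PySem.Set.diff
        (PySem.Set.ofList (pin.toList.map (fun c => String.ofList [c])))
        (PySem.Set.ofList (["0","1","2","3","4","5","6","7","8","9"] : List String))) = 0) ↔
      (pin.toList.all (fun c => decide ('0' ≤ c) && decide (c ≤ '9')) = true) := by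
  rw [PySem.Set.ofList_eq_self_of_nodup (["0","1","2","3","4","5","6","7","8","9"] : List String)
    (by decide)]
  unfold PySem.Set.diff PySem.Set.len
  rw [Int.natCast_eq_zero, List.length_eq_zero_iff, List.filter_eq_nil_iff]
  simp only [List.all_eq_true, Bool.not_eq_true', Bool.not_eq_false, Bool.and_eq_true,
    decide_eq_true_eq]
  constructor
  · intro h c hc
    have := h (String.ofList [c]) ((PySem.Set.mem_ofList _ _).mpr (List.mem_map_of_mem hc))
    have hm := (digit_mem c).mp (by simpa using this)
    exact ⟨(char_le_digit0 c).mpr hm.1, (char_le_digit9 c).mpr hm.2⟩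
  · intro h x hx
    rcases List.mem_map.mp ((PySem.Set.mem_ofList _ _).mp hx) with ⟨c, hc, rfl⟩
    have := h c hc
    have hm := (digit_mem c).mpr ⟨(char_le_digit0 c).mp this.1, (char_le_digit9 c).mp this.2⟩
    simpa using hm

-- the sequential check A's loop performs, with the running slice already resolved to the suffix
def chkA (avail : List String) : List String → Bool
  | [] => true
  | pin :: rest =>
    if rest.contains pin then false
    else if PySem.Str.len pin ≠ 4 then false
    else if PySem.Set.len (PySem.Set.diff
              (PySem.Set.ofList (pin.toList.map (fun c => String.ofList [c])))
              (PySem.Set.ofList avail)) ≠ 0 then false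
    else chkA avail rest

theorem loopA_eq (avail : List String) :
    ∀ (rest done : List String),
      isValidPinLoopA (done ++ rest) avail rest ((done.length : Int) + 1) = chkA avail rest := by
  intro rest
  induction rest with
  | nil => intro done; rfl
  | cons pin t ih =>
    intro done
    have hslice : PySem.List.slice (done ++ pin :: t) (some ((done.length : Int) + 1)) none = t := by
      rw [PySem.List.slice_from _ (by positivity)]
      have h1 : ((done.length : Int) + 1).toNat = (done ++ [pin]).length := by
        simp
      rw [h1, show done ++ pin :: t = (done ++ [pin]) ++ t by simp, List.drop_left]
    show isValidPinLoopA (done ++ pin :: t) avail (pin :: t) ((done.length : Int) + 1) = _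
    unfold isValidPinLoopA chkA
    rw [hslice]
    split
    · rfl
    · split
      · rfl
      · split
        · rfl
        · have harg : ((done.length : Int) + 1) + 1 = (((done ++ [pin]).length : Int) + 1) := by
            simp only [List.length_append, List.length_cons, List.length_nil]; push_cast; ring
          rw [harg, show done ++ pin :: t = (done ++ [pin]) ++ t by simp, ih (done ++ [pin])]

-- chkA over the digit list holds iff all pins are valid and there are no duplicates
theorem chkA_true_iff (l : List String) :
    chkA (["0","1","2","3","4","5","6","7","8","9"] : List String) l = true ↔
      (l.all pvPinOkB = true ∧ l.Nodup) := by
  induction l with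
  | nil => simp [chkA]
  | cons pin t ih =>
    unfold chkA
    split_ifs with h1 h2 h3
    · simp only [false_iff, not_and]
      intro _ hnd
      exact absurd (List.nodup_cons.mp hnd).1 (fun h => h (List.contains_iff_mem.mp h1))
    · simp only [false_iff, not_and]
      intro hall _
      have hok := (List.all_eq_true.mp hall) pin (List.mem_cons_self ..)
      unfold pvPinOkB at hok
      rw [Bool.and_eq_true] at hok
      exact h2 (by simpa using hok.1)
    · simp only [false_iff, not_and]
      intro hall _
      have hok := (List.all_eq_true.mp hall) pin (List.mem_cons_self ..)
      unfold pvPinOkB at hok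
      rw [Bool.and_eq_true] at hok
      exact h3 (by rw [(numbers_check_eq pin).mpr hok.2])
    · have hok : pvPinOkB pin = true := by
        unfold pvPinOkB
        rw [Bool.and_eq_true]
        exact ⟨by simpa using h2, (numbers_check_eq pin).mp (not_ne_iff.mp h3)⟩
      have hmem : pin ∉ t := fun h => h1 (List.contains_iff_mem.mpr h)
      rw [ih]
      simp [List.all_cons, hok, List.nodup_cons, hmem]

-- Python's 'len(set(xs)) == len(xs)' is exactly Nodup
theorem setlen_eq_nodup (xs : List String) :
    ((PySem.Set.len (PySem.Set.ofList xs) == PySem.List.len xs) = true) ↔ xs.Nodup := by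
  unfold PySem.Set.len PySem.List.len
  rw [beq_iff_eq, Int.natCast_inj]
  constructor
  · intro h
    have h1 : List.Subperm (PySem.Set.ofList xs) xs :=
      List.subperm_of_subset (PySem.Set.nodup_ofList xs)
        (fun x hx => (PySem.Set.mem_ofList xs x).mp hx)
    exact (h1.perm_of_length_le (le_of_eq h.symm)).nodup (PySem.Set.nodup_ofList xs)
  · intro h
    rw [PySem.Set.ofList_eq_self_of_nodup xs h]

-- ===== VERDICT (by name: the statement is the Claim_ definition above) =====
theorem is_valid_pin_codes_spec : Claim_equal_is_valid_pin_codes := by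
  intro pin_codes _
  show is_valid_pin_codes pin_codes = is_valid_pin_codes_alt pin_codes
  unfold is_valid_pin_codes is_valid_pin_codes_alt
  have havail : (PySem.List.pyRange 0 10 1).map PySem.Int.toStr =
      (["0","1","2","3","4","5","6","7","8","9"] : List String) := by decide
  cases pin_codes with
  | nil => rfl
  | cons p t =>
    rw [havail]
    have hloop : isValidPinLoopA (p :: t)
        (["0","1","2","3","4","5","6","7","8","9"] : List String) (p :: t) 1 =
        chkA (["0","1","2","3","4","5","6","7","8","9"] : List String) (p :: t) := by
      have h := loopA_eq (["0","1","2","3","4","5","6","7","8","9"] : List String) (p :: t) []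
      simpa using h
    rw [if_neg (by simp only [PySem.List.len_eq, beq_iff_eq, List.length_cons]; push_cast; omega),
      if_neg (by simp), hloop]
    rw [Bool.eq_iff_iff, chkA_true_iff]
    by_cases hall : (p :: t).all pvPinOkB = true
    · rw [hall]
      simp only [Bool.not_true, Bool.false_eq_true, if_false, setlen_eq_nodup]
      tauto
    · have hall' : (p :: t).all pvPinOkB = false := by
        rcases Bool.eq_false_or_eq_true ((p :: t).all pvPinOkB) with h | h
        · exact absurd h hall
        · exact h
      simp [hall']
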